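-- pv_equiv track=rewrite | github.com/RubiAgus/Algo1Python | practica7.py | replaceODD_with0OUT
-- ===== SOURCE A (Python) =====
-- from typing import List, Tuple
--
-- def replaceODD_with0OUT(lst: List [int])-> List [int]:
--    lista = []
--    for i in range(len(lst)):
--       if i % 2 == 0 and i != 0:
--          lista.append(0)
--       else:
--          lista.append(lst[i])
--
--    return(lista)
-- ===== SOURCE B (Python) =====
-- from typing import List, Tuple
--
-- def replaceODD_with0OUT(lst: List[int]) -> List[int]:
--     # Copy the input, then zero out indices 2, 4, 6, ... in one bulk slice assignment.
--     result = list(lst)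
--     result[2::2] = [0] * len(result[2::2])
--     return result
-- ===== Notes on version B (the rewrite author's own statement) =====
-- stated objective: idiomatic
-- what changed: Replaces the explicit index loop with per-element if/else appends by a shallow copy plus one bulk slice assignment over the even positions from index 2 on, zeroing them directly.
import Mathlib
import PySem

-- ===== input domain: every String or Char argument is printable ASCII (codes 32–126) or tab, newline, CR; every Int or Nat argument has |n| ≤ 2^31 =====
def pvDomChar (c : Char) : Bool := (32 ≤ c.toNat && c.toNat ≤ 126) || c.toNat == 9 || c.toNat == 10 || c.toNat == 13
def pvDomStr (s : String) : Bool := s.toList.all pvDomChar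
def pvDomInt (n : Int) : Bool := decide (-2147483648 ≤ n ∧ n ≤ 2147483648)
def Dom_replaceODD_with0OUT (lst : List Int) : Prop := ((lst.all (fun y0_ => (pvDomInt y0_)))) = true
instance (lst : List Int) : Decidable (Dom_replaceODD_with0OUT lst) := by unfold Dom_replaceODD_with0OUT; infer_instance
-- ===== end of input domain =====

-- B replaces A's index loop (append 0 at even nonzero indices, else append lst[i]) by a shallow
-- copy followed by one bulk slice assignment result[2::2] = [0]*k; equivalence proved pointwise.


-- ===== PORT A =====
-- for i in range(len(lst)): if i % 2 == 0 and i != 0: lista.append(0) else: lista.append(lst[i])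
def replaceODD_with0OUT (lst : List Int) : List Int :=
  (PySem.List.pyRange 0 (PySem.List.len lst) 1).foldl
    (fun lista i =>
      if PySem.Int.mod i 2 = 0 ∧ i ≠ 0 then lista ++ [(0 : Int)]
      else lista ++ [PySem.List.pyGetD lst i 0]) []

-- ===== PORT B =====
-- result = list(lst); result[2::2] = [0]*len(result[2::2]); the slice assignment writes 0 at
-- each index of range(2, len(lst), 2), ported as a fold of in-place set over that range.
def replaceODD_with0OUT_alt (lst : List Int) : List Int :=
  (PySem.List.pyRange 2 (PySem.List.len lst) 2).foldl
    (fun result i => result.set i.toNat 0) lst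

-- ===== PRECONDITION & SPEC =====
def Spec_replaceODD_with0OUT (lst : List Int) (out : List Int) : Prop := out = replaceODD_with0OUT_alt lst
instance (lst : List Int) (out : List Int) : Decidable (Spec_replaceODD_with0OUT lst out) := by unfold Spec_replaceODD_with0OUT; infer_instance

-- ===== CLAIM (what is proved, stated in full; the proofs are below) =====
def Claim_equal_replaceODD_with0OUT : Prop := ∀ (lst : List Int), Dom_replaceODD_with0OUT lst → Spec_replaceODD_with0OUT lst (replaceODD_with0OUT lst)

-- ===== LEMMAS AND PROOFS =====

-- A's fold of singleton appends is a map over the index range.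
theorem portA_eq_map (lst : List Int) :
    replaceODD_with0OUT lst =
      (PySem.List.pyRange 0 (PySem.List.len lst) 1).map
        (fun i => if PySem.Int.mod i 2 = 0 ∧ i ≠ 0 then (0 : Int) else PySem.List.pyGetD lst i 0) := by
  unfold replaceODD_with0OUT
  have h : (fun (lista : List Int) (i : Int) =>
      if PySem.Int.mod i 2 = 0 ∧ i ≠ 0 then lista ++ [(0 : Int)]
      else lista ++ [PySem.List.pyGetD lst i 0]) =
      (fun (lista : List Int) (i : Int) =>
        lista ++ [if PySem.Int.mod i 2 = 0 ∧ i ≠ 0 then (0 : Int) else PySem.List.pyGetD lst i 0]) := by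
    funext lista i; split <;> rfl
  rw [h, PySem.List.foldl_append_singleton_eq_map]
  simp

-- Folding `set · 0` over a list of nonnegative indices, characterised pointwise.
theorem getElem?_foldl_set (ixs : List Int) (xs : List Int) (j : Nat)
    (hpos : ∀ i ∈ ixs, 0 ≤ i) :
    (ixs.foldl (fun acc i => acc.set i.toNat 0) xs)[j]? =
      if (j : Int) ∈ ixs then (if j < xs.length then some (0 : Int) else none) else xs[j]? := by
  induction ixs generalizing xs with
  | nil => simp
  | cons i t ih =>
    simp only [List.foldl_cons]
    rw [ih _ (fun k hk => hpos k (List.mem_cons_of_mem _ hk))]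
    have hi : 0 ≤ i := hpos i (List.mem_cons_self ..)
    by_cases hji : (j : Int) = i
    · have : i.toNat = j := by omega
      simp [this, List.getElem?_set, List.length_set, hji]
    · have hne : i.toNat ≠ j := by omega
      by_cases hmem : (j : Int) ∈ t
      · simp [hmem, hji, List.length_set]
      · simp [hmem, hji, hne]

-- ===== VERDICT (by name: the statement is the Claim_ definition above) =====
theorem replaceODD_with0OUT_spec : Claim_equal_replaceODD_with0OUT := by
  intro lst _
  unfold Spec_replaceODD_with0OUT replaceODD_with0OUT_alt
  rw [portA_eq_map]
  apply List.ext_getElem?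
  intro j
  have hpos : ∀ i ∈ PySem.List.pyRange 2 (PySem.List.len lst) 2, (0 : Int) ≤ i := by
    intro i hi
    have := (PySem.List.mem_pyRange_iff_of_pos (by norm_num) i).mp hi
    omega
  rw [getElem?_foldl_set _ _ _ hpos]
  by_cases hj : j < lst.length
  · have hA : ((PySem.List.pyRange 0 (PySem.List.len lst) 1).map
        (fun i => if PySem.Int.mod i 2 = 0 ∧ i ≠ 0 then (0 : Int)
                  else PySem.List.pyGetD lst i 0))[j]? =
        some (if PySem.Int.mod (j : Int) 2 = 0 ∧ (j : Int) ≠ 0 then (0 : Int)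
              else PySem.List.pyGetD lst (j : Int) 0) := by
      simp only [PySem.List.len_eq]
      exact PySem.List.getElem?_map_pyRange_zero _ lst.length j hj
    rw [hA]
    have hmemiff : (j : Int) ∈ PySem.List.pyRange 2 (PySem.List.len lst) 2 ↔
        (2 ≤ (j : Int) ∧ (j : Int) < (lst.length : Int) ∧ (2 : Int) ∣ (j : Int) - 2) := by
      simpa using PySem.List.mem_pyRange_iff_of_pos (a := 2) (b := PySem.List.len lst)
        (s := 2) (by norm_num) (j : Int)
    have hmod : PySem.Int.mod (j : Int) 2 = (j : Int) % 2 :=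
      PySem.Int.mod_eq_emod_of_pos (by norm_num)
    by_cases hmem : (j : Int) ∈ PySem.List.pyRange 2 (PySem.List.len lst) 2
    · obtain ⟨h2, _, hdvd⟩ := hmemiff.mp hmem
      have hcond : PySem.Int.mod (j : Int) 2 = 0 ∧ (j : Int) ≠ 0 := by
        constructor
        · rw [hmod]; omega
        · omega
      rw [if_pos hcond, if_pos hmem, if_pos hj]
    · have hnc : ¬ (PySem.Int.mod (j : Int) 2 = 0 ∧ (j : Int) ≠ 0) := by
        intro h
        obtain ⟨hm, h0⟩ := h
        rw [hmod] at hm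
        exact hmem (hmemiff.mpr ⟨by omega, by omega, by omega⟩)
      rw [if_neg hnc, if_neg hmem]
      rw [PySem.List.pyGetD_natCast]
      simp [List.getD_eq_getElem?_getD, List.getElem?_eq_getElem hj]
  · have hmem : ¬ (j : Int) ∈ PySem.List.pyRange 2 (PySem.List.len lst) 2 := by
      intro h
      have := (PySem.List.mem_pyRange_iff_of_pos (by norm_num) (j : Int)).mp h
      simp only [PySem.List.len_eq] at this
      omega
    rw [if_neg hmem, List.getElem?_eq_none (l := lst) (by omega)]
    apply List.getElem?_eq_none
    simp only [List.length_map, PySem.List.len_eq, PySem.List.length_pyRange_one]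
    omega
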